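-- pv_equiv track=rewrite | github.com/ODCS1/PersonalTechStudies | python/exercicios/lista8/ex15.py | posicao_direita_sequencia_while
-- ===== SOURCE A (Python) =====
-- def posicao_direita_sequencia_while(sequencia: tuple[int], vetor: tuple[int]) -> int:
--     if not isinstance(sequencia, tuple) or not isinstance(vetor, tuple):
--         raise ValueError("O argumento do parâmetro era esperado uma tupla!")
--
--     len_seq = len(sequencia)
--     posicao = -1
--     i = 0
--     while i < len(vetor) - len_seq + 1:
--         if vetor[i:i+len_seq] == sequencia:
--             posicao = i
--         i += 1
--     return posicao
-- ===== SOURCE B (Python) =====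
-- def posicao_direita_sequencia_while(sequencia: tuple, vetor: tuple) -> int:
--     if not isinstance(sequencia, tuple) or not isinstance(vetor, tuple):
--         raise ValueError("O argumento do parâmetro era esperado uma tupla!")
--     m = len(sequencia)
--     for i in range(len(vetor) - m, -1, -1):
--         if all(vetor[i + j] == sequencia[j] for j in range(m)):
--             return i
--     return -1
-- ===== Notes on version B (the rewrite author's own statement) =====
-- stated objective: alternative
-- what changed: A scans every window left-to-right, building and comparing a full slice at each position and keeping the last match; B scans right-to-left comparing element-wise with short-circuit and returns at the first (rightmost) match, trading A's slice allocations for per-element comparisons.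
import Mathlib
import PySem

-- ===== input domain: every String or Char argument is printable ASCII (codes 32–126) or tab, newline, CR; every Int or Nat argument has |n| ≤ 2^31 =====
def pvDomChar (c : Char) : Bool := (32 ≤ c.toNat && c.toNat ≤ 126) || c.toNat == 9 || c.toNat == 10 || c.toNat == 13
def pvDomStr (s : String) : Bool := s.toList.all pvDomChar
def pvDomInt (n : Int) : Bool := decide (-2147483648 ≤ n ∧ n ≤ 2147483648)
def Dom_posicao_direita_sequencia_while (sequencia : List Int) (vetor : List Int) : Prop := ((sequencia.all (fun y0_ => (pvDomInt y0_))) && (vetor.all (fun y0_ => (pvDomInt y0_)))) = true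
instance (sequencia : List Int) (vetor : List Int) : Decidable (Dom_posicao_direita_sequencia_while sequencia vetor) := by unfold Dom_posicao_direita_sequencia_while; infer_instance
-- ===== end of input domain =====

-- B replaces A's left-to-right full scan (slice comparison at every window, keeping the last match)
-- by a right-to-left scan with element-wise short-circuit comparison that returns at the first match.


-- ===== PORT A =====
-- the while loop: i counts up, posicao keeps the index of the last matching slice
def pvALoop (sequencia vetor : List Int) (lenSeq : Nat) (i : Nat) (posicao : Int) : Int :=
  if h : (i : Int) < (vetor.length : Int) - (lenSeq : Int) + 1 then
    pvALoop sequencia vetor lenSeq (i + 1)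
      (if PySem.List.slice vetor (some (i : Int)) (some ((i : Int) + (lenSeq : Int))) = sequencia
       then (i : Int) else posicao)
  else posicao
termination_by vetor.length + 1 - i
decreasing_by omega

def posicao_direita_sequencia_while (sequencia : List Int) (vetor : List Int) : Int :=
  pvALoop sequencia vetor sequencia.length 0 (-1)

-- ===== PORT B =====
-- all(vetor[i+j] == sequencia[j] for j in range(m))
def pvBMatch (sequencia vetor : List Int) (i : Nat) : Bool :=
  (List.range sequencia.length).all
    (fun j => PySem.List.pyGet? vetor ((i : Int) + (j : Int)) == PySem.List.pyGet? sequencia (j : Int))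

-- for i in range(len(vetor)-m, -1, -1): early return at the first (rightmost) match
def pvBLoop (sequencia vetor : List Int) (i : Nat) : Int :=
  if pvBMatch sequencia vetor i then (i : Int)
  else
    match i with
    | 0 => -1
    | k + 1 => pvBLoop sequencia vetor k

def posicao_direita_sequencia_while_alt (sequencia : List Int) (vetor : List Int) : Int :=
  if vetor.length < sequencia.length then -1
  else pvBLoop sequencia vetor (vetor.length - sequencia.length)

-- ===== PRECONDITION & SPEC =====
def Spec_posicao_direita_sequencia_while (sequencia : List Int) (vetor : List Int) (out : Int) : Prop := out = posicao_direita_sequencia_while_alt sequencia vetor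
instance (sequencia : List Int) (vetor : List Int) (out : Int) : Decidable (Spec_posicao_direita_sequencia_while sequencia vetor out) := by unfold Spec_posicao_direita_sequencia_while; infer_instance

-- ===== CLAIM (what is proved, stated in full; the proofs are below) =====
def Claim_equal_posicao_direita_sequencia_while : Prop := ∀ (sequencia : List Int) (vetor : List Int), Dom_posicao_direita_sequencia_while sequencia vetor → Spec_posicao_direita_sequencia_while sequencia vetor (posicao_direita_sequencia_while sequencia vetor)

-- ===== LEMMAS AND PROOFS =====

-- A's loop body, as a fold step over a Nat index
def pvF (s v : List Int) (q : Int) (j : Nat) : Int :=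
  if PySem.List.slice v (some (j : Int)) (some ((j : Int) + (s.length : Int))) = s
  then (j : Int) else q

-- A's slice test and B's element-wise test agree on in-range windows
lemma pv_chk_iff (s v : List Int) (i : Nat) (_h : i + s.length ≤ v.length) :
    (PySem.List.slice v (some (i : Int)) (some ((i : Int) + (s.length : Int))) = s)
      ↔ pvBMatch s v i = true := by
  rw [PySem.List.slice_natCast_add]
  unfold pvBMatch
  simp only [List.all_eq_true, List.mem_range, beq_iff_eq]
  constructor
  · intro he j hj
    have hc : ((i : Int) + (j : Int)) = (((i + j : Nat) : Int)) := by push_cast; ring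
    rw [hc, PySem.List.pyGet?_natCast, PySem.List.pyGet?_natCast]
    rw [← he]
    simp [List.getElem?_drop, hj]
  · intro hp
    apply List.ext_getElem?
    intro k
    by_cases hk : k < s.length
    · have hpk := hp k hk
      have hc : ((i : Int) + (k : Int)) = (((i + k : Nat) : Int)) := by push_cast; ring
      rw [hc, PySem.List.pyGet?_natCast, PySem.List.pyGet?_natCast] at hpk
      simpa [List.getElem?_take, List.getElem?_drop, hk] using hpk
    · have h1 : ((v.drop i).take s.length)[k]? = none := by
        apply List.getElem?_eq_none
        have := List.length_take (l := v.drop i) (i := s.length)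
        omega
      have h2 : s[k]? = none := List.getElem?_eq_none (by omega)
      rw [h1, h2]

-- unroll A's while loop into a foldl over the remaining indices
lemma pv_aloop_foldl (s v : List Int) (i : Nat) (p : Int)
    (hm : s.length ≤ v.length) :
    pvALoop s v s.length i p =
      List.foldl (pvF s v) p (List.range' i (v.length - s.length + 1 - i)) := by
  generalize hk : v.length - s.length + 1 - i = k
  induction k generalizing i p with
  | zero =>
      rw [pvALoop]
      have hng : ¬ ((i : Int) < (v.length : Int) - (s.length : Int) + 1) := by omega
      simp [hng]
  | succ k ih =>
      rw [pvALoop]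
      have hlt : (i : Int) < (v.length : Int) - (s.length : Int) + 1 := by omega
      rw [dif_pos hlt]
      rw [ih (i + 1) _ (by omega)]
      rw [List.range'_succ, List.foldl_cons]
      rfl

-- the last-match foldl over [0..i] equals B's first-match-from-the-right loop
lemma pv_foldl_bloop (s v : List Int) (i : Nat) (h : i + s.length ≤ v.length) :
    List.foldl (pvF s v) (-1) (List.range' 0 (i + 1)) = pvBLoop s v i := by
  induction i with
  | zero =>
      rw [pvBLoop]
      rw [List.range'_one, List.foldl_cons, List.foldl_nil]
      unfold pvF
      by_cases hc : pvBMatch s v 0 = true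
      · have hcl := (pv_chk_iff s v 0 (by omega)).mpr hc
        rw [if_pos (by exact_mod_cast hcl), if_pos hc]
      · have hncl : ¬ (PySem.List.slice v (some ((0:Nat) : Int)) (some (((0:Nat) : Int) + (s.length : Int))) = s) := by
          intro hcl; exact hc ((pv_chk_iff s v 0 (by omega)).mp hcl)
        rw [if_neg (by exact_mod_cast hncl), if_neg hc]
  | succ k ih =>
      have hr : List.range' 0 (k + 1 + 1) = List.range' 0 (k + 1) ++ [k + 1] := by
        simpa using List.range'_concat (step := 1) (s := 0) (n := k + 1)
      rw [hr, List.foldl_append, List.foldl_cons, List.foldl_nil]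
      rw [ih (by omega)]
      rw [pvBLoop]
      unfold pvF
      by_cases hc : pvBMatch s v (k + 1) = true
      · have hcl := (pv_chk_iff s v (k + 1) (by omega)).mpr hc
        rw [if_pos (by exact_mod_cast hcl), if_pos hc]
      · have hncl : ¬ (PySem.List.slice v (some ((k + 1 : Nat) : Int)) (some (((k + 1 : Nat) : Int) + (s.length : Int))) = s) := by
          intro hcl; exact hc ((pv_chk_iff s v (k + 1) (by omega)).mp hcl)
        rw [if_neg (by exact_mod_cast hncl), if_neg hc]

-- ===== VERDICT (by name: the statement is the Claim_ definition above) =====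
theorem posicao_direita_sequencia_while_spec : Claim_equal_posicao_direita_sequencia_while := by
  intro s v _
  unfold Spec_posicao_direita_sequencia_while
  unfold posicao_direita_sequencia_while posicao_direita_sequencia_while_alt
  by_cases hm : v.length < s.length
  · rw [pvALoop]
    have hng : ¬ ((0 : Int) < (v.length : Int) - (s.length : Int) + 1) := by omega
    simp [hng, hm]
  · have hm' : s.length ≤ v.length := by omega
    rw [if_neg (by omega)]
    rw [pv_aloop_foldl s v 0 (-1) (by omega)]
    have he : v.length - s.length + 1 - 0 = (v.length - s.length) + 1 := by omega
    rw [he, pv_foldl_bloop s v (v.length - s.length) (by omega)]
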